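-- pv_equiv track=rewrite | github.com/pr4nshul/CFC-Python-DSA | Siddhant/q4.py | Anargams
-- ===== SOURCE A (Python) =====
-- def Anargams(lists):
--     result = []
--     for string in lists:
--         freq = {}
--         for item in string:
--             freq[item] = freq.get(item, 0) + 1
--         result.append(freq)
--     ans = []
--     for i in range(len(result) // 2):
--         for j in range(i + 1, len(result)):
--             if result[i] == result[j]:
--                 ans.append([i + 1,j + 1])
--     return ans
-- ===== SOURCE B (Python) =====
-- def Anargams(lists):
--     n = len(lists)
--     keys = [tuple(sorted(s)) for s in lists]
--     groups = {}
--     for j, k in enumerate(keys):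
--         groups.setdefault(k, []).append(j)
--     ans = []
--     for i in range(n // 2):
--         for j in groups[keys[i]]:
--             if j > i:
--                 ans.append([i + 1, j + 1])
--     return ans
-- ===== Notes on version B (the rewrite author's own statement) =====
-- stated objective: alternative
-- what changed: Replace the O(n^2) pairwise frequency-dict comparisons by a single grouping pass: each string is mapped to its canonical sorted-character key, indices are bucketed per key in one dict, and pairs are read off within each bucket (intended as faster; a timing run measured only 1.37x at the largest size, its inputs being output-dominated).
import Mathlib
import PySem

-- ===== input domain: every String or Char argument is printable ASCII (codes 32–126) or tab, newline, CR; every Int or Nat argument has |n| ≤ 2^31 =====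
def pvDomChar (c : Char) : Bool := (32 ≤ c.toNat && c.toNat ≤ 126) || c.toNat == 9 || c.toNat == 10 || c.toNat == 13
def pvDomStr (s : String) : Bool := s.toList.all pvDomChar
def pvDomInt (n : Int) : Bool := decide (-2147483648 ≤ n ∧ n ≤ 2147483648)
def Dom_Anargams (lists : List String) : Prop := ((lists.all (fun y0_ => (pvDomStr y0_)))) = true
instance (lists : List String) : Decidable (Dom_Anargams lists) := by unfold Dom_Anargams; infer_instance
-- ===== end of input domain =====

-- B replaces A's pairwise frequency-dict comparisons by one grouping pass over
-- canonical sorted-character keys (objective: alternative algorithm, same results).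

-- ===== PORT A =====
-- freq = {}; for item in string: freq[item] = freq.get(item, 0) + 1
def pyFreq (s : List Char) : PySem.Dict Char Int :=
  s.foldl (fun d c => d.insert c (d.getD c 0 + 1)) PySem.Dict.empty

-- Python's `d1 == d2` on dicts: same key set and equal values (order-ignoring)
def pyDictEq (d1 d2 : PySem.Dict Char Int) : Bool :=
  PySem.Set.equal d1.keys d2.keys && d1.keys.all (fun k => d1.getD k 0 == d2.getD k 0)

-- result[i] / result[j]: the loop indices are always in bounds, so pyGetD with a
-- dummy default is exact here
def Anargams (lists : List String) : List (List Int) :=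
  let result : List (PySem.Dict Char Int) :=
    lists.foldl (fun acc s => acc ++ [pyFreq s.toList]) []
  (PySem.List.pyRange 0 (PySem.Int.floordiv (result.length : Int) 2) 1).foldl (fun ans i =>
    (PySem.List.pyRange (i + 1) (result.length : Int) 1).foldl (fun ans j =>
      if pyDictEq (PySem.List.pyGetD result i PySem.Dict.empty)
                  (PySem.List.pyGetD result j PySem.Dict.empty)
      then ans ++ [[i + 1, j + 1]] else ans) ans) []

-- ===== PORT B =====
-- tuple(sorted(s))
def sortKey (s : List Char) : List Char := PySem.List.sorted s (fun c => c) false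

-- groups.setdefault(k, []).append(j); groups[keys[i]]: the key of index i is always
-- present and i is in bounds, so getD / pyGetD are exact here
def Anargams_alt (lists : List String) : List (List Int) :=
  let n := lists.length
  let keys : List (List Char) := lists.map (fun s => sortKey s.toList)
  let groups : PySem.Dict (List Char) (List Int) :=
    (PySem.List.enumerate keys 0).foldl (fun d p => d.modify p.2 [] (· ++ [p.1])) PySem.Dict.empty
  (PySem.List.pyRange 0 (PySem.Int.floordiv (n : Int) 2) 1).foldl (fun ans i =>
    (groups.getD (PySem.List.pyGetD keys i []) []).foldl (fun ans j =>
      if j > i then ans ++ [[i + 1, j + 1]] else ans) ans) []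

-- ===== PRECONDITION & SPEC =====
def Spec_Anargams (lists : List String) (out : List (List Int)) : Prop := out = Anargams_alt lists
instance (lists : List String) (out : List (List Int)) : Decidable (Spec_Anargams lists out) := by unfold Spec_Anargams; infer_instance

-- ===== CLAIM (what is proved, stated in full; the proofs are below) =====
def Claim_equal_Anargams : Prop := ∀ (lists : List String), Dom_Anargams lists → Spec_Anargams lists (Anargams lists)

-- ===== LEMMAS AND PROOFS =====
lemma pyRange_succ_natCast (a n : Nat) :
    PySem.List.pyRange ((a : Int) + 1) (n : Int) 1
      = ((List.range n).filter (fun j => decide (a < j))).map (fun (j : Nat) => (j : Int)) := by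
  induction n with
  | zero => simp [PySem.List.pyRange_one_eq_nil (by omega : (0:Int) ≤ (a:Int) + 1)]
  | succ n ih =>
    rw [List.range_succ, List.filter_append, List.map_append]
    by_cases h : a < n
    · rw [show ((n+1 : Nat) : Int) = (n : Int) + 1 by push_cast; ring,
        PySem.List.pyRange_one_succ_right (by exact_mod_cast Nat.succ_le_of_lt h), ih]
      simp [h]
    · rw [PySem.List.pyRange_one_eq_nil (by push_cast; omega)]
      have h2 : ((List.range n).filter (fun j => decide (a < j))) = [] :=
        List.filter_eq_nil_iff.2 (fun j hj => by simp [List.mem_range] at hj ⊢; omega)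
      simp [h2, h]

lemma nested_norm {b : Type} (L : List Int) (inner : Int → List Int)
    (q : Int → Int → Bool) (f : Int → Int → b) :
    L.foldl (fun ans i => (inner i).foldl
        (fun ans j => if q i j then ans ++ [f i j] else ans) ans) []
      = L.flatMap (fun i => ((inner i).filter (q i)).map (f i)) := by
  simp only [PySem.List.foldl_append_if]
  rw [PySem.List.foldl_append_eq_flatMap, List.nil_append]

lemma A_norm (lists : List String) :
    Anargams lists = (List.range (lists.length / 2)).flatMap (fun k =>
      ((List.range lists.length).filter (fun j =>
          pyDictEq ((lists.map (fun s => pyFreq s.toList)).getD k PySem.Dict.empty)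
                   ((lists.map (fun s => pyFreq s.toList)).getD j PySem.Dict.empty)
          && decide (k < j))).map (fun (j : Nat) => [(k : Int) + 1, (j : Int) + 1])) := by
  unfold Anargams
  simp only [PySem.List.foldl_append_singleton_eq_map, List.nil_append, List.length_map]
  rw [show PySem.Int.floordiv (↑lists.length) 2 = ((lists.length / 2 : Nat) : Int) from by
    exact_mod_cast PySem.Int.floordiv_natCast lists.length 2]
  rw [PySem.List.pyRange_zero_natCast]
  rw [nested_norm (q := fun i j => pyDictEq
      (PySem.List.pyGetD (List.map (fun s => pyFreq s.toList) lists) i PySem.Dict.empty)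
      (PySem.List.pyGetD (List.map (fun s => pyFreq s.toList) lists) j PySem.Dict.empty))
      (f := fun i j => [i + 1, j + 1])
      (inner := fun i => PySem.List.pyRange (i + 1) ↑lists.length 1)]
  rw [List.flatMap_map]
  refine List.flatMap_congr (fun a ha => ?_)
  rw [show (a : Int) + 1 = ((a:Int)) + 1 from rfl, pyRange_succ_natCast a lists.length,
    List.filter_map, List.filter_filter, List.map_map]
  simp [PySem.List.pyGetD_natCast, Function.comp]

lemma nested_norm' {b : Type} (L : List Int) (inner : Int → List Int)
    (q : Int → Int → Prop) [∀ i j, Decidable (q i j)] (f : Int → Int → b) :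
    L.foldl (fun ans i => (inner i).foldl
        (fun ans j => if q i j then ans ++ [f i j] else ans) ans) []
      = L.flatMap (fun i => ((inner i).filter (fun j => decide (q i j))).map (f i)) := by
  simp only [PySem.List.foldl_append_ite]
  rw [PySem.List.foldl_append_eq_flatMap, List.nil_append]

lemma groups_getD (keys : List (List Char)) (c : List Char) :
    ((PySem.List.enumerate keys 0).foldl
        (fun d p => d.modify p.2 [] (· ++ [p.1])) PySem.Dict.empty).getD c []
      = ((List.range keys.length).filter (fun j => keys.getD j [] == c)).map
          (fun (j : Nat) => (j : Int)) := by
  rw [← List.foldl_map (f := fun (p : Int × List Char) => (p.2, p.1))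
      (g := fun (d : PySem.Dict (List Char) (List Int)) (q : List Char × Int) =>
        d.modify q.1 [] (· ++ [q.2]))]
  rw [PySem.Dict.getD_foldl_modify_append]
  rw [PySem.List.enumerate_eq_map_pyRange (d := [])]
  simp only [List.map_map, List.filter_map, PySem.Dict.getD_empty,
    List.nil_append, PySem.List.len_eq, PySem.List.pyRange_zero_natCast]
  simp [Function.comp_def, PySem.List.pyGetD_natCast]

lemma B_norm (lists : List String) :
    Anargams_alt lists = (List.range (lists.length / 2)).flatMap (fun (k : Nat) =>
      ((List.range lists.length).filter (fun (j : Nat) =>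
          decide ((k : Int) < (j : Int))
          && ((lists.map (fun s => sortKey s.toList)).getD j []
              == (lists.map (fun s => sortKey s.toList)).getD k []))).map
        (fun (j : Nat) => [(k : Int) + 1, (j : Int) + 1])) := by
  unfold Anargams_alt
  simp only [groups_getD, List.length_map]
  rw [show PySem.Int.floordiv (↑lists.length) 2 = ((lists.length / 2 : Nat) : Int) from by
    exact_mod_cast PySem.Int.floordiv_natCast lists.length 2]
  rw [PySem.List.pyRange_zero_natCast]
  rw [nested_norm' (q := fun i j => j > i)
      (f := fun i j => [i + 1, j + 1])
      (inner := fun i => ((List.range lists.length).filter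
        (fun j => (lists.map (fun s => sortKey s.toList)).getD j []
          == PySem.List.pyGetD (lists.map (fun s => sortKey s.toList)) i [])).map
          (fun (j : Nat) => (j : Int)))]
  rw [List.flatMap_map]
  refine List.flatMap_congr (fun a ha => ?_)
  simp only [List.filter_map, List.filter_filter, List.map_map, Function.comp,
    PySem.List.pyGetD_natCast]
  simp [Function.comp_def, gt_iff_lt]

lemma pyDictEq_iff_perm (xs ys : List Char) :
    pyDictEq (pyFreq xs) (pyFreq ys) = true ↔ xs.Perm ys := by
  have hx : pyFreq xs = PySem.Dict.counter xs := rfl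
  have hy : pyFreq ys = PySem.Dict.counter ys := rfl
  rw [List.perm_iff_count]
  simp [pyDictEq, hx, hy, PySem.Dict.keys_counter, PySem.Dict.getD_counter,
    PySem.Set.equal_iff, PySem.Set.mem_ofList, List.all_eq_true]
  constructor
  · rintro ⟨hmem, hcnt⟩ c
    by_cases hc : c ∈ xs
    · exact_mod_cast hcnt c hc
    · have hcy : c ∉ ys := fun h => hc ((hmem c).2 h)
      simp [List.count_eq_zero.2 hc, List.count_eq_zero.2 hcy]
  · intro h
    constructor
    · intro c
      constructor <;> intro hc <;> rw [← List.count_pos_iff] at hc ⊢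
      · exact h c ▸ hc
      · exact (h c).symm ▸ hc
    · intro k _; exact h k

lemma cond_eq (lists : List String) (k j : Nat) (hk : k < lists.length)
    (hj : j < lists.length) :
    (pyDictEq ((lists.map (fun s => pyFreq s.toList)).getD k PySem.Dict.empty)
        ((lists.map (fun s => pyFreq s.toList)).getD j PySem.Dict.empty)
      && decide (k < j))
    = (decide ((k : Int) < (j : Int))
      && ((lists.map (fun s => sortKey s.toList)).getD j []
          == (lists.map (fun s => sortKey s.toList)).getD k [])) := by
  rw [List.getD_eq_getElem _ _ (by simpa using hk), List.getD_eq_getElem _ _ (by simpa using hj),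
    List.getD_eq_getElem _ _ (by simpa using hj), List.getD_eq_getElem _ _ (by simpa using hk)]
  simp only [List.getElem_map]
  rw [Bool.and_comm]
  congr 1
  · simp
  · rw [Bool.eq_iff_iff]
    rw [pyDictEq_iff_perm, beq_iff_eq]
    unfold sortKey
    rw [PySem.List.sorted_id_eq_sorted_id_iff_perm]
    exact ⟨List.Perm.symm, List.Perm.symm⟩

theorem main_eq (lists : List String) : Anargams lists = Anargams_alt lists := by
  rw [A_norm, B_norm]
  refine List.flatMap_congr (fun k hk => ?_)
  congr 1
  refine List.filter_congr (fun j hj => ?_)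
  simp only [List.mem_range] at hk hj
  exact cond_eq lists k j (lt_of_lt_of_le hk (Nat.div_le_self _ _)) hj

-- ===== VERDICT (by name: the statement is the Claim_ definition above) =====
theorem Anargams_spec : Claim_equal_Anargams := by
  intro lists _
  unfold Spec_Anargams
  exact main_eq lists
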